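-- pv_equiv track=rewrite | github.com/ptt3199/chinese-chess-robot | PlayChess.py | wrong_position
-- ===== SOURCE A (Python) =====
-- def wrong_position(chess_x_image, chess_y_image):  # error 1
--     x_rights = [20, 61, 102, 143, 184, 225, 266, 307, 348]
--     y_rights = [20, 61, 102, 143, 184, 225, 266, 307, 348, 389]
--     error = 6
--     x_fail, y_fail = False, False
--     size = len(chess_x_image)
--     for i in range(size):
--         for x in range(7):
--             if x_rights[x] + error <= chess_x_image[i] <= x_rights[x + 1] - error:
--                 x_fail = True
--         for y in range(8):
--             if y_rights[y] + error <= chess_y_image[i] <= y_rights[y + 1] - error: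
--                 y_fail = True
--     return x_fail and y_fail
-- ===== SOURCE B (Python) =====
-- def wrong_position(chess_x_image, chess_y_image):
--     # Closed-form grid-cell test: position v lies strictly inside cell k
--     # (offset from origin 20, step 41, inclusive margin 6) iff divmod says so.
--     def in_cell(v, last_k):
--         k, r = divmod(v - 20, 41)
--         return 0 <= k <= last_k and 6 <= r <= 35
--     pairs = list(zip(chess_x_image, chess_y_image))
--     x_fail = any(in_cell(vx, 6) for vx, _ in pairs)
--     y_fail = any(in_cell(vy, 7) for _, vy in pairs)
--     return x_fail and y_fail
-- ===== Notes on version B (the rewrite author's own statement) =====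
-- stated objective: simpler
-- what changed: Replaces the per-position 7- and 8-iteration interval scans over hard-coded grid boundary lists with a single closed-form divmod grid-cell test per coordinate, walking the two coordinate lists once, zipped, with any().
import Mathlib
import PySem

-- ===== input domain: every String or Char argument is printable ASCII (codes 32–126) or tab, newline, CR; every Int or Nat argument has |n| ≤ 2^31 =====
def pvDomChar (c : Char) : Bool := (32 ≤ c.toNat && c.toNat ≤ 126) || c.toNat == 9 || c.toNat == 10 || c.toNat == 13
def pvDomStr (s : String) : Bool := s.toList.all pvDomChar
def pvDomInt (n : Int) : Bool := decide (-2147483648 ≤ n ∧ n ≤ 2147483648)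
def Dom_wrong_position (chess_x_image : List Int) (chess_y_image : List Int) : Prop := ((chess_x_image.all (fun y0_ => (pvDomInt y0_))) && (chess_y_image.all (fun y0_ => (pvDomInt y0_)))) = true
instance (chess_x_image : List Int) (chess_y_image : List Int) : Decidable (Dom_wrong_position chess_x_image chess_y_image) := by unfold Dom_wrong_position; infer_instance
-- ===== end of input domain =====

-- B replaces A's 7/8-iteration inner interval scans by one closed-form divmod
-- grid-cell test per coordinate and walks the two lists once, zipped (objective: simpler).

-- ===== PORT A =====
def pvXRights : List Int := [20, 61, 102, 143, 184, 225, 266, 307, 348]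
def pvYRights : List Int := [20, 61, 102, 143, 184, 225, 266, 307, 348, 389]

def wrong_position (chess_x_image : List Int) (chess_y_image : List Int) : Bool :=
  let error : Int := 6
  let size := chess_x_image.length
  let st := (List.range size).foldl (fun (st : Bool × Bool) (i : Nat) =>
    let xf := (List.range 7).foldl (fun (xf : Bool) (x : Nat) =>
      if pvXRights.getD x 0 + error ≤ chess_x_image.getD i 0 ∧
         chess_x_image.getD i 0 ≤ pvXRights.getD (x + 1) 0 - error then true else xf) st.1
    let yf := (List.range 8).foldl (fun (yf : Bool) (y : Nat) =>
      if pvYRights.getD y 0 + error ≤ chess_y_image.getD i 0 ∧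
         chess_y_image.getD i 0 ≤ pvYRights.getD (y + 1) 0 - error then true else yf) st.2
    (xf, yf)) (false, false)
  st.1 && st.2

-- ===== PORT B =====
def pvInCell (v : Int) (lastK : Int) : Bool :=
  let k := PySem.Int.floordiv (v - 20) 41
  let r := PySem.Int.mod (v - 20) 41
  decide (0 ≤ k ∧ k ≤ lastK ∧ 6 ≤ r ∧ r ≤ 35)

def wrong_position_alt (chess_x_image : List Int) (chess_y_image : List Int) : Bool :=
  let pairs := chess_x_image.zip chess_y_image
  let x_fail := pairs.any (fun p => pvInCell p.1 6)
  let y_fail := pairs.any (fun p => pvInCell p.2 7)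
  x_fail && y_fail

-- ===== PRECONDITION & SPEC =====
-- A indexes chess_y_image by every i < len(chess_x_image): it raises IndexError
-- exactly when chess_y_image is shorter; Pre_ excludes exactly those inputs.
def Pre_wrong_position (chess_x_image : List Int) (chess_y_image : List Int) : Prop :=
  chess_x_image.length ≤ chess_y_image.length
instance (chess_x_image : List Int) (chess_y_image : List Int) : Decidable (Pre_wrong_position chess_x_image chess_y_image) := by unfold Pre_wrong_position; infer_instance

def pvWitness_wrong_position : List Int × List Int := ([26, 100], [30, 200])

def Spec_wrong_position (chess_x_image : List Int) (chess_y_image : List Int) (out : Bool) : Prop := out = wrong_position_alt chess_x_image chess_y_image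
instance (chess_x_image : List Int) (chess_y_image : List Int) (out : Bool) : Decidable (Spec_wrong_position chess_x_image chess_y_image out) := by unfold Spec_wrong_position; infer_instance

-- ===== CLAIM (what is proved, stated in full; the proofs are below) =====
def Claim_equal_wrong_position : Prop := ∀ (chess_x_image : List Int) (chess_y_image : List Int), Dom_wrong_position chess_x_image chess_y_image → Pre_wrong_position chess_x_image chess_y_image → Spec_wrong_position chess_x_image chess_y_image (wrong_position chess_x_image chess_y_image)

-- ===== LEMMAS AND PROOFS =====
lemma pv_if_or (p : Prop) [Decidable p] (b : Bool) : (if p then true else b) = (decide p || b) := by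
  split_ifs with h <;> simp [h]

lemma pv_inner_x (a : Bool) (v : Int) :
    (List.range 7).foldl (fun (xf : Bool) (x : Nat) =>
      if pvXRights.getD x 0 + 6 ≤ v ∧ v ≤ pvXRights.getD (x + 1) 0 - 6 then true else xf) a
      = (a || pvInCell v 6) := by
  simp only [List.range_succ, List.range_zero, List.foldl_append, List.foldl_cons,
    List.foldl_nil, pv_if_or, pvXRights]
  rw [Bool.eq_iff_iff]
  simp only [pvInCell, Bool.or_eq_true, decide_eq_true_eq, List.getD]
  rw [PySem.Int.floordiv_eq_ediv_of_pos (by norm_num), PySem.Int.mod_eq_emod_of_pos (by norm_num)]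
  cases a
  · simp
    omega
  · simp

lemma pv_inner_y (a : Bool) (v : Int) :
    (List.range 8).foldl (fun (yf : Bool) (y : Nat) =>
      if pvYRights.getD y 0 + 6 ≤ v ∧ v ≤ pvYRights.getD (y + 1) 0 - 6 then true else yf) a
      = (a || pvInCell v 7) := by
  simp only [List.range_succ, List.range_zero, List.foldl_append, List.foldl_cons,
    List.foldl_nil, pv_if_or, pvYRights]
  rw [Bool.eq_iff_iff]
  simp only [pvInCell, Bool.or_eq_true, decide_eq_true_eq, List.getD]
  rw [PySem.Int.floordiv_eq_ediv_of_pos (by norm_num), PySem.Int.mod_eq_emod_of_pos (by norm_num)]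
  cases a
  · simp
    omega
  · simp

lemma pv_outer (xs ys : List Int) (h : xs.length ≤ ys.length) (n : Nat) (hn : n ≤ xs.length)
    (a b : Bool) :
    (List.range n).foldl (fun (st : Bool × Bool) (i : Nat) =>
      let xf := (List.range 7).foldl (fun (xf : Bool) (x : Nat) =>
        if pvXRights.getD x 0 + 6 ≤ xs.getD i 0 ∧
           xs.getD i 0 ≤ pvXRights.getD (x + 1) 0 - 6 then true else xf) st.1
      let yf := (List.range 8).foldl (fun (yf : Bool) (y : Nat) =>
        if pvYRights.getD y 0 + 6 ≤ ys.getD i 0 ∧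
           ys.getD i 0 ≤ pvYRights.getD (y + 1) 0 - 6 then true else yf) st.2
      (xf, yf)) (a, b)
    = (a || ((xs.zip ys).take n).any (fun p => pvInCell p.1 6),
       b || ((xs.zip ys).take n).any (fun p => pvInCell p.2 7)) := by
  induction n with
  | zero => simp
  | succ n ih =>
    have hn' : n ≤ xs.length := Nat.le_of_succ_le hn
    have hx : n < xs.length := hn
    have hy : n < ys.length := lt_of_lt_of_le hx h
    have hz : n < (xs.zip ys).length := by simp [List.length_zip]; omega
    rw [show List.range (n+1) = List.range n ++ [n] from List.range_succ, List.foldl_append, ih hn']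
    have htake : ((xs.zip ys).take (n + 1)) = ((xs.zip ys).take n) ++ [(xs[n], ys[n])] := by
      rw [List.take_add_one]
      simp [List.getElem?_eq_getElem hz]
    simp only [List.foldl_cons, List.foldl_nil, pv_inner_x, pv_inner_y, htake, List.any_append,
      List.any_cons, List.any_nil, List.getD_eq_getElem _ _ hx, List.getD_eq_getElem _ _ hy]
    simp [Bool.or_assoc]

theorem wrong_position_spec : Claim_equal_wrong_position := by
  intro xs ys _ hpre
  unfold Spec_wrong_position wrong_position wrong_position_alt
  have hpre' : xs.length ≤ ys.length := hpre
  have hlen : (xs.zip ys).length = xs.length := by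
    simp [List.length_zip]; omega
  simp only []
  rw [pv_outer xs ys hpre' xs.length le_rfl false false]
  rw [← hlen, List.take_length]
  simp
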